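-- pv_equiv track=rewrite | github.com/SCappella/riddler | 2020-05-22-states/states.py | longest_mackerel_ties
-- ===== SOURCE A (Python) =====
-- def mackerel_state(states, word):
--     mackerel_states = [state for state in states if not (set(state) & set(word))]
--     if len(mackerel_states) == 1:
--         return mackerel_states[0]
--
-- def longest_mackerel_ties(states, words, length):
--     # casefold words/states
--     states = [state.casefold() for state in states]
--     words = [word.casefold() for word in words]
--
--     words = [word for word in words if len(word) == length]
--
--     for word in words:
--         state = mackerel_state(states, word)
--         if state is not None:
--             yield (word, state)
-- ===== SOURCE B (Python) =====
-- def longest_mackerel_ties(states, words, length):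
--     # transposed nesting: state-outer loop maintaining a per-word
--     # (disjoint-count, candidate-state) table keyed by position
--     states = [state.casefold() for state in states]
--     ws = [word.casefold() for word in words]
--     ws = [word for word in ws if len(word) == length]
--     counts = [0] * len(ws)
--     cands = [""] * len(ws)
--     for state in states:
--         sset = set(state)
--         for i, word in enumerate(ws):
--             if sset.isdisjoint(word):
--                 counts[i] += 1
--                 cands[i] = state
--     for i, word in enumerate(ws):
--         if counts[i] == 1:
--             yield (word, cands[i])
-- ===== Notes on version B (the rewrite author's own statement) =====
-- stated objective: alternative
-- what changed: Transposed the nesting (state-outer instead of word-outer) and replaced the per-word match-list build with a positional count/candidate table filled in one sweep over the states, then a final pass yields words whose count is exactly one.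
import Mathlib
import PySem

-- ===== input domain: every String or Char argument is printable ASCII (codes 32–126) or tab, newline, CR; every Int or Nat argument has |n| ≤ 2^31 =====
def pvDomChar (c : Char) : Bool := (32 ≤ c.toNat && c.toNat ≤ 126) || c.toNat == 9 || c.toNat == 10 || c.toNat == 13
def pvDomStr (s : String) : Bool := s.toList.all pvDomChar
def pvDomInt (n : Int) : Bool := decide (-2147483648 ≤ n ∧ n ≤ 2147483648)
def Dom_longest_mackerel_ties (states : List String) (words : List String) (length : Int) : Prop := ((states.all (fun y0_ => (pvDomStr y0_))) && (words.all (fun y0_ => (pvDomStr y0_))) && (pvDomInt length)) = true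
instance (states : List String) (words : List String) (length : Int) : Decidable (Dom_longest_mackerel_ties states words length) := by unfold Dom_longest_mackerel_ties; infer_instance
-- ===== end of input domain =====

-- B transposes A's word-outer/state-inner nesting into a state-outer sweep over a
-- positional count/candidate table; same cost, alternative decomposition (return value only; both are generators, compared as lists).

-- ===== PORT A =====
-- 'set(state) & set(word)' is nonempty iff some char of state occurs in word
def pvShares (s w : List Char) : Bool := s.any (fun c => w.contains c)

def mackerel_state (states : List String) (word : String) : Option String :=
  let mackerel_states := states.filter (fun st => !(pvShares st.toList word.toList))
  -- 'if len(...) == 1: return mackerel_states[0]' (else implicit None)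
  match mackerel_states with
  | [s] => some s
  | _ => none

def longest_mackerel_ties (states : List String) (words : List String) (length : Int) : List (String × String) :=
  let sts := states.map PySem.Str.lower          -- casefold = lower on the ASCII domain
  let ws := (words.map PySem.Str.lower).filter (fun w => ((PySem.Str.len w : Int) == length))
  ws.foldl (fun acc w =>
    match mackerel_state sts w with
    | some st => acc ++ [(w, st)]
    | none => acc) []

-- ===== PORT B =====
def longest_mackerel_ties_alt (states : List String) (words : List String) (length : Int) : List (String × String) :=
  let sts := states.map PySem.Str.lower          -- casefold = lower on the ASCII domain
  let ws := (words.map PySem.Str.lower).filter (fun w => ((PySem.Str.len w : Int) == length))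
  -- state-outer sweep: each state bumps count and records itself at every disjoint word's position
  let table := sts.foldl
    (fun tbl st => (tbl.zip ws).map (fun p =>
      if !(pvShares st.toList p.2.toList) then (p.1.1 + 1, st) else p.1))
    (ws.map (fun _ => ((0 : Nat), "")))
  -- final pass: yield the words whose disjoint-state count is exactly one
  (ws.zip table).foldr (fun p acc => if p.2.1 = 1 then (p.1, p.2.2) :: acc else acc) []

-- ===== PRECONDITION & SPEC =====
def Spec_longest_mackerel_ties (states : List String) (words : List String) (length : Int) (out : List (String × String)) : Prop := out = longest_mackerel_ties_alt states words length
instance (states : List String) (words : List String) (length : Int) (out : List (String × String)) : Decidable (Spec_longest_mackerel_ties states words length out) := by unfold Spec_longest_mackerel_ties; infer_instance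

-- ===== CLAIM (what is proved, stated in full; the proofs are below) =====
def Claim_equal_longest_mackerel_ties : Prop := ∀ (states : List String) (words : List String) (length : Int), Dom_longest_mackerel_ties states words length → Spec_longest_mackerel_ties states words length (longest_mackerel_ties states words length)

-- ===== LEMMAS AND PROOFS =====

-- mapping over the zip of a mapped list with the list itself is a plain map
theorem pv_zip_map_map {α β γ : Type} (l : List α) (h : α → β) (f : β × α → γ) :
    ((l.map h).zip l).map f = l.map (fun x => f (h x, x)) := by
  induction l with
  | nil => rfl
  | cons x l ih => simp only [List.map_cons, List.zip_cons_cons, ih]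

-- B's whole table fold, pointwise
theorem pv_table_fold (sts ws : List String) (h : String → Nat × String) :
    sts.foldl
      (fun tbl st => (tbl.zip ws).map (fun p =>
        if !(pvShares st.toList p.2.toList) then (p.1.1 + 1, st) else p.1))
      (ws.map h)
    = ws.map (fun w => sts.foldl
        (fun p st => if !(pvShares st.toList w.toList) then (p.1 + 1, st) else p) (h w)) := by
  induction sts generalizing h with
  | nil => simp
  | cons st sts ih =>
      simp only [List.foldl_cons,
        pv_zip_map_map ws h (fun p => if !(pvShares st.toList p.2.toList) then (p.1.1 + 1, st) else p.1)]
      exact ih (fun w => if !(pvShares st.toList w.toList) then ((h w).1 + 1, st) else h w)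

-- per-word accumulator characterised by the filtered state list
theorem pv_word_fold (sts : List String) (w : String) (c : Nat) (cand : String) :
    sts.foldl (fun p st => if !(pvShares st.toList w.toList) then (p.1 + 1, st) else p) (c, cand)
    = (c + (sts.filter (fun st => !(pvShares st.toList w.toList))).length,
       (sts.filter (fun st => !(pvShares st.toList w.toList))).getLastD cand) := by
  induction sts generalizing c cand with
  | nil => simp
  | cons st sts ih =>
      simp only [List.foldl_cons, List.filter_cons]
      by_cases hd : pvShares st.toList w.toList
      · rw [if_neg (by simp [hd]), if_neg (by simp [hd])]
        exact ih c cand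
      · rw [if_pos (by simp [hd]), if_pos (by simp [hd]), ih (c + 1) st]
        simp only [List.length_cons, List.getLastD_cons, Prod.mk.injEq]
        exact ⟨by omega, trivial⟩

theorem pv_zip_map (ws : List String) (F : String → Nat × String) :
    ws.zip (ws.map F) = ws.map (fun w => (w, F w)) := by
  induction ws with
  | nil => rfl
  | cons w ws ih => simp only [List.map_cons, List.zip_cons_cons, ih]

-- A's accumulator-appending loop, pulled out of the accumulator
theorem pv_A_fold (sts : List String) (ws : List String) (acc : List (String × String)) :
    ws.foldl (fun acc w =>
      match mackerel_state sts w with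
      | some st => acc ++ [(w, st)]
      | none => acc) acc
    = acc ++ ws.foldl (fun acc w =>
      match mackerel_state sts w with
      | some st => acc ++ [(w, st)]
      | none => acc) [] := by
  induction ws generalizing acc with
  | nil => simp
  | cons w ws ih =>
      simp only [List.foldl_cons]
      cases hms : mackerel_state sts w with
      | none => exact ih acc
      | some st =>
          simp only [List.nil_append]
          rw [ih (acc ++ [(w, st)]), ih [(w, st)]]
          simp [List.append_assoc]

-- the two loop organisations produce the same output list
theorem pv_main (sts ws : List String) :
    ws.foldl (fun acc w =>
      match mackerel_state sts w with
      | some st => acc ++ [(w, st)]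
      | none => acc) []
    = (ws.map (fun w => (w,
        ((sts.filter (fun st => !(pvShares st.toList w.toList))).length,
         (sts.filter (fun st => !(pvShares st.toList w.toList))).getLastD "")))).foldr
        (fun p acc => if p.2.1 = 1 then (p.1, p.2.2) :: acc else acc) [] := by
  induction ws with
  | nil => rfl
  | cons w ws ih =>
      simp only [List.map_cons, List.foldr_cons, List.foldl_cons]
      rw [pv_A_fold, ih]
      cases hfl : sts.filter (fun st => !(pvShares st.toList w.toList)) with
      | nil => simp [mackerel_state, hfl]
      | cons x xs =>
          cases xs with
          | nil => simp [mackerel_state, hfl]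
          | cons y ys => simp [mackerel_state, hfl]

-- ===== VERDICT (by name: the statement is the Claim_ definition above) =====
theorem longest_mackerel_ties_spec : Claim_equal_longest_mackerel_ties := by
  intro states words length _
  simp only [Spec_longest_mackerel_ties, longest_mackerel_ties, longest_mackerel_ties_alt]
  rw [pv_table_fold (states.map PySem.Str.lower)
        ((words.map PySem.Str.lower).filter (fun w => ((PySem.Str.len w : Int) == length)))
        (fun _ => ((0 : Nat), ""))]
  simp only [pv_word_fold, Nat.zero_add]
  rw [pv_zip_map]
  exact pv_main _ _
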